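-- pv_equiv track=rewrite | github.com/Bahmni/openerp-modules | bahmni_print_bill/number_to_marathi.py | number_to_string_in_devnagari
-- ===== SOURCE A (Python) =====
-- digit_to_string_in_devnagari_lookup_table = [
--     "०",
--     "१",
--     "२",
--     "३",
--     "४",
--     "५",
--     "६",
--     "७",
--     "८",
--     "९"
-- ]
--
-- def number_to_string_in_devnagari(number):
--     string_in_devnagari = ""
--     while True:
--         digit  = number % 10
--         string_in_devnagari = digit_to_string_in_devnagari_lookup_table[digit] + string_in_devnagari
--         number = int(number / 10)
--         if number == 0:
--             break
--     return string_in_devnagari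
-- ===== SOURCE B (Python) =====
-- digit_to_string_in_devnagari_lookup_table = [
--     "०",
--     "१",
--     "२",
--     "३",
--     "४",
--     "५",
--     "६",
--     "७",
--     "८",
--     "९"
-- ]
--
-- def number_to_string_in_devnagari(number):
--     # Recursive base-10 conversion: build the higher-order digits first via the
--     # call stack, then append this position's digit.
--     def rec(n):
--         q = int(n / 10)
--         prefix = "" if q == 0 else rec(q)
--         return prefix + digit_to_string_in_devnagari_lookup_table[n % 10]
--     return rec(number)
-- ===== Notes on version B (the rewrite author's own statement) =====
-- stated objective: alternative
-- what changed: Replaces the iterative while-loop that prepends each digit to an accumulator with a recursive most-significant-first conversion that builds the higher digits on the call stack and appends the current digit.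
import Mathlib
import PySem

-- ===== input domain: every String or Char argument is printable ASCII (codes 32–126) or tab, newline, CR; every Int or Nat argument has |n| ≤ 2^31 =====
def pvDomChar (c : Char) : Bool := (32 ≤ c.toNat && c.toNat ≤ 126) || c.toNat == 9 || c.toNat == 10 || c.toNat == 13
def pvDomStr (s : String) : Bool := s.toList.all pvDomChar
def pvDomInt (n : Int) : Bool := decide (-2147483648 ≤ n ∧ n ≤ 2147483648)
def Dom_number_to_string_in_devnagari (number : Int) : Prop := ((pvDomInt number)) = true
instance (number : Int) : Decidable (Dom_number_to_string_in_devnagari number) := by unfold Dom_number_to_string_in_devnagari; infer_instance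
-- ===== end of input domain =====

-- B replaces A's iterative digit-prepending loop by a recursive most-significant-first
-- conversion (alternative decomposition; same cost). Equivalence of the return value is proved.

-- ===== PORT A =====
def devnagariLookup : List String :=
  ["०", "१", "२", "३", "४", "५", "६", "७", "८", "९"]

-- termination helper for both ports: truncating division by 10 shrinks |n|
theorem pvTdiv10_lt (n : Int) (h : n.tdiv 10 ≠ 0) : (n.tdiv 10).natAbs < n.natAbs := by
  have h1 : (n.tdiv 10).natAbs = n.natAbs / 10 := Int.natAbs_tdiv n 10
  have h2 : (n.tdiv 10).natAbs ≠ 0 := Int.natAbs_ne_zero.mpr h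
  omega

-- the while-loop of A, state = (number, string_in_devnagari)
-- int(number / 10) is exact truncating division on |number| ≤ 2^31, ported as Int.tdiv
def devnagariLoop (number : Int) (acc : String) : String :=
  let digit := PySem.Int.mod number 10
  let acc' := (PySem.List.pyGet? devnagariLookup digit).getD "" ++ acc  -- digit ∈ [0,10): in range
  let number' := number.tdiv 10
  if h : number' = 0 then acc'
  else devnagariLoop number' acc'
termination_by number.natAbs
decreasing_by exact pvTdiv10_lt number h

def number_to_string_in_devnagari (number : Int) : String :=
  devnagariLoop number ""

-- ===== PORT B =====
-- the inner 'rec' of B: higher digits first via recursion, then this digit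
def devnagariRec (n : Int) : String :=
  let q := n.tdiv 10
  let prefix_ := if h : q = 0 then "" else devnagariRec q
  prefix_ ++ (PySem.List.pyGet? devnagariLookup (PySem.Int.mod n 10)).getD ""
termination_by n.natAbs
decreasing_by exact pvTdiv10_lt n h

def number_to_string_in_devnagari_alt (number : Int) : String :=
  devnagariRec number

-- ===== PRECONDITION & SPEC =====
def Spec_number_to_string_in_devnagari (number : Int) (out : String) : Prop := out = number_to_string_in_devnagari_alt number
instance (number : Int) (out : String) : Decidable (Spec_number_to_string_in_devnagari number out) := by unfold Spec_number_to_string_in_devnagari; infer_instance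

-- ===== CLAIM (what is proved, stated in full; the proofs are below) =====
def Claim_equal_number_to_string_in_devnagari : Prop := ∀ (number : Int), Dom_number_to_string_in_devnagari number → Spec_number_to_string_in_devnagari number (number_to_string_in_devnagari number)

-- ===== LEMMAS AND PROOFS =====
theorem devnagariLoop_eq_rec (n : Int) (acc : String) :
    devnagariLoop n acc = devnagariRec n ++ acc := by
  rw [devnagariLoop, devnagariRec]
  by_cases h : n.tdiv 10 = 0
  · simp [h]
  · rw [dif_neg h, dif_neg h,
      devnagariLoop_eq_rec (n.tdiv 10) ((PySem.List.pyGet? devnagariLookup (PySem.Int.mod n 10)).getD "" ++ acc)]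
    simp [String.append_assoc]
termination_by n.natAbs
decreasing_by exact pvTdiv10_lt n h

-- ===== VERDICT (by name: the statement is the Claim_ definition above) =====
theorem number_to_string_in_devnagari_spec : Claim_equal_number_to_string_in_devnagari := by
  intro number _
  unfold Spec_number_to_string_in_devnagari number_to_string_in_devnagari number_to_string_in_devnagari_alt
  rw [devnagariLoop_eq_rec]
  simp
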